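-- pv_equiv track=rewrite | github.com/spz-signup/spz-signup-app | src/spz/models.py | rating_to_ger
-- ===== SOURCE A (Python) =====
-- def rating_to_ger(percent):
--     """
--     Converts the percentage value of the English test to the corresponding GER Level (German Language Level).
--
--     returns: GER Level as string
--     """
--     conversion_table = [
--         (90, "C2"),
--         (80, "C1"),
--         (65, "B2"),
--         (50, "B1"),
--         (20, "A2")
--     ]
--
--     for percentage, ger in conversion_table:
--         if percent >= percentage:
--             return ger
--
--     return ""
-- ===== SOURCE B (Python) =====
-- def rating_to_ger(percent):
--     """
--     Converts the percentage value of the English test to the corresponding GER Level (German Language Level).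
--
--     returns: GER Level as string
--     """
--     cutoffs = [20, 50, 65, 80, 90]
--     labels = ["", "A2", "B1", "B2", "C1", "C2"]
--     # hand-written bisect_right (stdlib bisect not importable here)
--     lo, hi = 0, len(cutoffs)
--     while lo < hi:
--         mid = (lo + hi) // 2
--         if percent < cutoffs[mid]:
--             hi = mid
--         else:
--             lo = mid + 1
--     return labels[lo]
-- ===== Notes on version B (the rewrite author's own statement) =====
-- stated objective: alternative
-- what changed: Replaces the top-down linear scan of a (threshold,label) table by a binary search (hand-written bisect_right) over an ascending cutoff list indexing a parallel label list.
import Mathlib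
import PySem

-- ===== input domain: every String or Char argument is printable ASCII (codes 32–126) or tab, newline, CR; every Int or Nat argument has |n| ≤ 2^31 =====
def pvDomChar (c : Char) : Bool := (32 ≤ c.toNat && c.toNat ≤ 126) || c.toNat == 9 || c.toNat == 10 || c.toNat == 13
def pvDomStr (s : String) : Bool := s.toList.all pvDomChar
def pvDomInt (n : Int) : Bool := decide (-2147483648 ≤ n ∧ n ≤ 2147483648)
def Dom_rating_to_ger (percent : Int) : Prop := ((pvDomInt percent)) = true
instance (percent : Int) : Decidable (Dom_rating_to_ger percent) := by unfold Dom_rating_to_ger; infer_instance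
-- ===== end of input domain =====

-- B replaces A's top-down linear table scan by a binary search (bisect_right) over
-- an ascending cutoff list with a parallel label list (objective: alternative).

-- ===== PORT A =====
-- the for-loop over the literal table, branch per branch
def rating_to_ger (percent : Int) : String :=
  if percent ≥ 90 then "C2"
  else if percent ≥ 80 then "C1"
  else if percent ≥ 65 then "B2"
  else if percent ≥ 50 then "B1"
  else if percent ≥ 20 then "A2"
  else ""

-- ===== PORT B =====
-- hand-written bisect_right from Source B: while lo < hi loop as recursion on hi - lo
def pvBisectRight (a : List Int) (x : Int) (lo hi : Nat) : Nat :=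
  if lo < hi then
    let mid := (lo + hi) / 2
    if x < (PySem.List.pyGet? a (Int.ofNat mid)).getD 0 then
      pvBisectRight a x lo mid
    else
      pvBisectRight a x (mid + 1) hi
  else lo
termination_by hi - lo
decreasing_by all_goals omega

def rating_to_ger_alt (percent : Int) : String :=
  let cutoffs : List Int := [20, 50, 65, 80, 90]
  let labels : List String := ["", "A2", "B1", "B2", "C1", "C2"]
  let lo := pvBisectRight cutoffs percent 0 cutoffs.length
  (PySem.List.pyGet? labels (Int.ofNat lo)).getD ""

-- ===== PRECONDITION & SPEC =====
def Spec_rating_to_ger (percent : Int) (out : String) : Prop := out = rating_to_ger_alt percent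
instance (percent : Int) (out : String) : Decidable (Spec_rating_to_ger percent out) := by unfold Spec_rating_to_ger; infer_instance

-- ===== CLAIM (what is proved, stated in full; the proofs are below) =====
def Claim_equal_rating_to_ger : Prop := ∀ (percent : Int), Dom_rating_to_ger percent → Spec_rating_to_ger percent (rating_to_ger percent)

-- ===== LEMMAS AND PROOFS =====

-- ===== VERDICT (by name: the statement is the Claim_ definition above) =====
lemma pvBisectRight_eval (x : Int) :
    pvBisectRight [20, 50, 65, 80, 90] x 0 5 =
      if x < 20 then 0 else if x < 50 then 1 else if x < 65 then 2
      else if x < 80 then 3 else if x < 90 then 4 else 5 := by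
  by_cases h65 : x < 65
  · by_cases h50 : x < 50
    · by_cases h20 : x < 20
      · simp [pvBisectRight.eq_def, PySem.List.pyGet?, PySem.List.pyIdx?, h65, h50, h20]
      · simp [pvBisectRight.eq_def, PySem.List.pyGet?, PySem.List.pyIdx?, h65, h50, h20]
    · simp [pvBisectRight.eq_def, PySem.List.pyGet?, PySem.List.pyIdx?, h65, h50,
        show ¬ x < 20 by omega]
  · by_cases h90 : x < 90
    · by_cases h80 : x < 80
      · simp [pvBisectRight.eq_def, PySem.List.pyGet?, PySem.List.pyIdx?, h65, h90, h80,
          show ¬ x < 20 by omega, show ¬ x < 50 by omega]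
      · simp [pvBisectRight.eq_def, PySem.List.pyGet?, PySem.List.pyIdx?, h65, h90, h80,
          show ¬ x < 20 by omega, show ¬ x < 50 by omega]
    · simp [pvBisectRight.eq_def, PySem.List.pyGet?, PySem.List.pyIdx?, h65, h90,
        show ¬ x < 20 by omega, show ¬ x < 50 by omega, show ¬ x < 80 by omega]

theorem rating_to_ger_spec : Claim_equal_rating_to_ger := by
  intro percent _
  simp only [Spec_rating_to_ger, rating_to_ger, rating_to_ger_alt, List.length]
  rw [pvBisectRight_eval]
  split_ifs <;> first | rfl | omega
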